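-- pv_equiv track=rewrite | github.com/linhdvu14/cp-sols | sols/CodeChef/ENCO2022/ENCOD03.py | solve
-- ===== SOURCE A (Python) =====
-- from heapq import heappush, heappop, heapify
--
-- def batch_sieve(N):
--     '''return all primes in [2..N] in O(N)'''
--     primes = []
--     lpf = [0]*(N+1)  # least prime factor
--     for i in range(2, N+1):
--         if lpf[i] == 0:
--             primes.append(i)
--             lpf[i] = i
--         for p in primes:
--             if p*i > N or p > lpf[i]: break  # lpf[p*i] <= lpf[i] < p
--             lpf[p*i] = p                     # set once per composite number
--     return primes
--
-- def solve(N):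
--     h = batch_sieve(N)
--     heapify(h)
--     res = 0
--     while len(h) > 1:
--         a = heappop(h)
--         b = heappop(h)
--         res += a + b
--         heappush(h, a+b)
--     return res
-- ===== SOURCE B (Python) =====
-- def batch_sieve(N):
--     '''return all primes in [2..N] in O(N)'''
--     primes = []
--     lpf = [0]*(N+1)  # least prime factor
--     for i in range(2, N+1):
--         if lpf[i] == 0:
--             primes.append(i)
--             lpf[i] = i
--         for p in primes:
--             if p*i > N or p > lpf[i]: break  # lpf[p*i] <= lpf[i] < p
--             lpf[p*i] = p                     # set once per composite number
--     return primes
--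
--
-- def _take_min(primes, sums, i, j):
--     '''front of the two queues: primes[i:] and sums[j:]; pick the smaller head'''
--     if j == len(sums) or (i < len(primes) and primes[i] <= sums[j]):
--         return primes[i], i + 1, j
--     return sums[j], i, j + 1
--
--
-- def solve(N):
--     # two-queue Huffman merge: primes are already sorted, and merged sums are
--     # produced in nondecreasing order, so two FIFO pointers replace the heap
--     primes = batch_sieve(N)
--     sums = []
--     i = j = 0
--     res = 0
--     while (len(primes) - i) + (len(sums) - j) > 1:
--         a, i, j = _take_min(primes, sums, i, j)
--         b, i, j = _take_min(primes, sums, i, j)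
--         s = a + b
--         res += s
--         sums.append(s)
--     return res
-- ===== Notes on version B (the rewrite author's own statement) =====
-- stated objective: alternative
-- what changed: The heap-based Huffman merge over the primes is replaced by the two-queue method: the sorted prime list and an append-only list of merged sums are consumed through two FIFO pointers, picking the smaller front each time, so no heap sift operations are performed (the sieve is kept unchanged).
import Mathlib
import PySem

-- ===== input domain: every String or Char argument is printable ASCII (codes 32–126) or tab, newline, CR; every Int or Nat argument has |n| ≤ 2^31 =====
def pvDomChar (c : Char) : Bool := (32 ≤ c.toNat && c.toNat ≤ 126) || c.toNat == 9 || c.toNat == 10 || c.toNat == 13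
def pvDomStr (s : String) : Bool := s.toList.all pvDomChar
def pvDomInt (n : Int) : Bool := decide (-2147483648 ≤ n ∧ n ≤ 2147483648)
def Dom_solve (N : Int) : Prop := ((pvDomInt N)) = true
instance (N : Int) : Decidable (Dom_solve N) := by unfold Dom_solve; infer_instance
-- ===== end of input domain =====

-- B replaces the heap-based Huffman merge of the primes by the two-queue (two
-- FIFO pointers) method; the sieve is shared verbatim by both versions.

-- ===== PORT A =====

-- batch_sieve, shared helper of both versions (Source B contains a verbatim copy).
-- All list indices below (i, p*i) are nonnegative and in range on every reached
-- state, so Nat-indexed getD/set are exact for Python's lpf[i] reads/writes.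
def sieveInner (N i : Int) (ps : List Int) (lpf : List Int) : List Int :=
  match ps with
  | [] => lpf
  | p :: t =>
    if p * i > N ∨ p > lpf.getD i.toNat 0 then lpf
    else sieveInner N i t (lpf.set (p * i).toNat p)

def sieveStep (N : Int) (st : List Int × List Int) (i : Int) : List Int × List Int :=
  let primes := st.1
  let lpf := st.2
  let primes' := if lpf.getD i.toNat 0 = 0 then primes ++ [i] else primes
  let lpf' := if lpf.getD i.toNat 0 = 0 then lpf.set i.toNat i else lpf
  (primes', sieveInner N i primes' lpf')

def batchSieve (N : Int) : List Int :=
  ((PySem.List.pyRange 2 (N + 1) 1).foldl (sieveStep N)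
    ([], List.replicate (N + 1).toNat 0)).1

-- heapq._siftdown(heap, startpos, pos) with newitem = heap[pos] passed explicitly
-- (the loop writes heap[pos] before it could ever read it, so this is exact)
def sdLoop (l : List Int) (startpos pos : Nat) (ni : Int) : List Int :=
  if h : startpos < pos then
    -- parentpos = (pos - 1) >> 1
    if ni < l.getD ((pos - 1) / 2) 0 then
      sdLoop (l.set pos (l.getD ((pos - 1) / 2) 0)) startpos ((pos - 1) / 2) ni
    else l.set pos ni
  else l.set pos ni
termination_by pos
decreasing_by omega

-- heapq._siftup's descend-to-leaf loop followed by heap[pos]=newitem; _siftdown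
-- childpos selection inside _siftup's loop: right child iff it exists and
-- not heap[childpos] < heap[rightpos]
def childSel (l : List Int) (pos : Nat) : Nat :=
  if 2 * pos + 2 < l.length ∧ ¬ (l.getD (2 * pos + 1) 0 < l.getD (2 * pos + 2) 0)
  then 2 * pos + 2 else 2 * pos + 1

def suLoop (l : List Int) (startpos pos : Nat) (ni : Int) : List Int :=
  if _h : 2 * pos + 1 < l.length then
    suLoop (l.set pos (l.getD (childSel l pos) 0)) startpos (childSel l pos) ni
  else sdLoop (l.set pos ni) startpos pos ni
termination_by l.length - pos
decreasing_by
  simp only [List.length_set, childSel]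
  split <;> omega

def siftup (l : List Int) (pos : Nat) : List Int := suLoop l pos pos (l.getD pos 0)

-- heapq.heapify: for i in reversed(range(n//2)): _siftup(x, i)
def pyHeapify (l : List Int) : List Int :=
  ((List.range (l.length / 2)).reverse).foldl (fun h i => siftup h i) l

-- heapq.heappop; Python raises IndexError on [] — callers only pop when len>1,
-- so the [] branch below is never reached
def heappop (l : List Int) : Int × List Int :=
  match l with
  | [] => (0, [])
  | _ :: _ =>
    let lastelt := l.getLastD 0
    let rest := l.dropLast
    if rest.isEmpty then (lastelt, rest)
    else (rest.getD 0 0, siftup (rest.set 0 lastelt) 0)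

-- heapq.heappush: append then _siftdown(heap, 0, len(heap)-1)
def heappush (l : List Int) (item : Int) : List Int :=
  sdLoop (l ++ [item]) 0 l.length item

-- while len(h) > 1: a=heappop(h); b=heappop(h); res+=a+b; heappush(h,a+b)
-- fuel is only for termination; each iteration shrinks the heap by one, so
-- fuel = initial length is always enough
def loopA (fuel : Nat) (h : List Int) (res : Int) : Int :=
  match fuel with
  | 0 => res
  | fuel + 1 =>
    if 1 < h.length then
      let p1 := heappop h
      let p2 := heappop p1.2
      loopA fuel (heappush p2.2 (p1.1 + p2.1)) (res + (p1.1 + p2.1))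
    else res

def solve (N : Int) : Int :=
  let h := pyHeapify (batchSieve N)
  loopA h.length h 0

-- ===== PORT B =====

-- _take_min(primes, sums, i, j)
def takeMin (primes sums : List Int) (i j : Nat) : Int × Nat × Nat :=
  if j = sums.length ∨ (i < primes.length ∧ primes.getD i 0 ≤ sums.getD j 0) then
    (primes.getD i 0, i + 1, j)
  else (sums.getD j 0, i, j + 1)

-- while (len(primes)-i)+(len(sums)-j) > 1: pop two mins, append their sum.
-- fuel is only for termination; remaining-element count drops by one per
-- iteration, so fuel = len(primes) is always enough
def loopB (fuel : Nat) (primes sums : List Int) (i j : Nat) (res : Int) : Int :=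
  match fuel with
  | 0 => res
  | fuel + 1 =>
    if 1 < (primes.length - i) + (sums.length - j) then
      let t1 := takeMin primes sums i j
      let t2 := takeMin primes sums t1.2.1 t1.2.2
      let s := t1.1 + t2.1
      loopB fuel primes (sums ++ [s]) t2.2.1 t2.2.2 (res + s)
    else res

def solve_alt (N : Int) : Int :=
  let primes := batchSieve N
  loopB primes.length primes [] 0 0 0

-- ===== PRECONDITION & SPEC =====
def Spec_solve (N : Int) (out : Int) : Prop := out = solve_alt N
instance (N : Int) (out : Int) : Decidable (Spec_solve N out) := by unfold Spec_solve; infer_instance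

-- ===== CLAIM (what is proved, stated in full; the proofs are below) =====
def Claim_equal_solve : Prop := ∀ (N : Int), Dom_solve N → Spec_solve N (solve N)

-- ===== LEMMAS AND PROOFS =====

-- ---- basic list facts ----
theorem getD_set_ne (l : List Int) (m n : Nat) (v : Int) (h : m ≠ n) :
    (l.set m v).getD n 0 = l.getD n 0 := by
  simp [List.getD, List.getElem?_set_ne h]

theorem getD_set_self (l : List Int) (m : Nat) (v : Int) (h : m < l.length) :
    (l.set m v).getD m 0 = v := by
  simp [List.getD, h]

theorem set_getD_self (l : List Int) (m : Nat) (h : m < l.length) :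
    l.set m (l.getD m 0) = l := by
  have : l.getD m 0 = l[m] := List.getD_eq_getElem l 0 h
  rw [this, List.set_getElem_self]

theorem set_perm (l : List Int) (n : Nat) (x : Int) (h : n < l.length) :
    (l.set n x).Perm (x :: l.eraseIdx n) := by
  induction l generalizing n with
  | nil => simp at h
  | cons a t ih =>
    cases n with
    | zero => simp
    | succ m =>
      simp only [List.set_cons_succ, List.eraseIdx_cons_succ]
      exact ((ih m (by simpa using h)).cons a).trans (List.Perm.swap x a _)

theorem eraseIdx_set_same (l : List Int) (n : Nat) (x : Int) :
    (l.set n x).eraseIdx n = l.eraseIdx n := by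
  induction l generalizing n with
  | nil => simp
  | cons a t ih =>
    cases n with
    | zero => simp
    | succ m => simpa using ih m

theorem holeMove (l : List Int) (p q : Nat) (hp : p < l.length) (hq : q < l.length)
    (hne : p ≠ q) :
    ((l.set p (l.getD q 0)).eraseIdx q).Perm (l.eraseIdx p) := by
  set m := l.set p (l.getD q 0) with hm
  have h1 : m.Perm (l.getD q 0 :: l.eraseIdx p) := set_perm l p _ hp
  have hq' : q < m.length := by simpa [hm]
  have h2 : m.Perm (m.getD q 0 :: m.eraseIdx q) := by
    have := set_perm m q (m.getD q 0) hq'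
    rwa [set_getD_self m q hq'] at this
  have hqv : m.getD q 0 = l.getD q 0 := getD_set_ne l p q _ hne
  rw [hqv] at h2
  exact (h2.symm.trans h1).cons_inv

-- ---- heap predicates ----
def IsHeap (l : List Int) : Prop :=
  ∀ j, 0 < j → j < l.length → l.getD ((j - 1) / 2) 0 ≤ l.getD j 0

-- heap with a "hole" at p: all parent-child edges not touching p hold, and the
-- grandparent of p bounds p's children directly
def HeapHole (l : List Int) (p : Nat) : Prop :=
  (∀ j, 0 < j → j < l.length → j ≠ p → (j - 1) / 2 ≠ p →
      l.getD ((j - 1) / 2) 0 ≤ l.getD j 0) ∧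
  (∀ j, j < l.length → (j - 1) / 2 = p → 0 < p →
      l.getD ((p - 1) / 2) 0 ≤ l.getD j 0)

theorem heapHole_set_hole (l : List Int) (p : Nat) (x : Int) (h : HeapHole l p) :
    HeapHole (l.set p x) p := by
  obtain ⟨h1, h2⟩ := h
  constructor
  · intro j hj hjl hjp hpar
    rw [getD_set_ne _ _ _ _ (Ne.symm hjp), getD_set_ne _ _ _ _ (Ne.symm hpar)]
    exact h1 j hj (by simpa using hjl) hjp hpar
  · intro j hjl hpar hp
    have hjp : j ≠ p := by omega
    have hgp : (p - 1) / 2 ≠ p := by omega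
    rw [getD_set_ne _ _ _ _ (Ne.symm hjp), getD_set_ne _ _ _ _ (Ne.symm hgp)]
    exact h2 j (by simpa using hjl) hpar hp

theorem sdLoop_spec (pos : Nat) (l : List Int) (ni : Int)
    (hpos : pos < l.length) (hh : HeapHole l pos)
    (hch : ∀ j, j < l.length → 0 < j → (j - 1) / 2 = pos → ni ≤ l.getD j 0) :
    IsHeap (sdLoop l 0 pos ni) ∧ (sdLoop l 0 pos ni).Perm (ni :: l.eraseIdx pos) := by
  induction pos using Nat.strong_induction_on generalizing l with
  | _ pos ih =>
  rw [sdLoop]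
  rcases Nat.eq_zero_or_pos pos with rfl | hp
  · rw [dif_neg (lt_irrefl 0)]
    refine ⟨?_, set_perm l 0 ni (by omega)⟩
    intro j hj hjl
    rw [List.length_set] at hjl
    by_cases hpar : (j - 1) / 2 = 0
    · rw [hpar, getD_set_self l 0 ni hpos, getD_set_ne l 0 j ni (by omega)]
      exact hch j hjl hj hpar
    · rw [getD_set_ne l 0 _ ni (by omega), getD_set_ne l 0 j ni (by omega)]
      exact hh.1 j hj hjl (by omega) hpar
  · rw [dif_pos hp]
    set par := (pos - 1) / 2 with hpar
    have hparlt : par < pos := by omega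
    have hparlen : par < l.length := by omega
    split
    · next hlt =>
      -- recursive case: ni < heap[parentpos]
      set l' := l.set pos (l.getD par 0) with hl'
      have hlen' : l'.length = l.length := by simp [hl']
      have hgd : ∀ k, k ≠ pos → l'.getD k 0 = l.getD k 0 :=
        fun k hk => getD_set_ne l pos k _ (fun h => hk h.symm)
      have hgdp : l'.getD pos 0 = l.getD par 0 := getD_set_self l pos _ hpos
      have hh' : HeapHole l' par := by
        constructor
        · intro j hj hjl hjp hparp
          rw [hlen'] at hjl
          by_cases hjpos : j = pos
          · exact absurd (by omega : (j - 1) / 2 = par) hparp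
          · rw [hgd j hjpos]
            by_cases hpj : (j - 1) / 2 = pos
            · rw [hpj, hgdp]
              exact hh.2 j hjl hpj hp
            · rw [hgd _ hpj]
              exact hh.1 j hj hjl hjpos hpj
        · intro j hjl hjc hpp
          rw [hlen'] at hjl
          have hgp : (par - 1) / 2 ≠ pos := by omega
          rw [hgd _ hgp]
          have hstep : l.getD ((par - 1) / 2) 0 ≤ l.getD par 0 :=
            hh.1 par hpp hparlen (by omega) (by omega)
          by_cases hjpos : j = pos
          · rw [hjpos, hgdp]; exact hstep
          · rw [hgd j hjpos]
            have h2 : l.getD ((j - 1) / 2) 0 ≤ l.getD j 0 :=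
              hh.1 j (by omega) hjl hjpos (by omega)
            rw [hjc] at h2
            omega
      have hch' : ∀ j, j < l'.length → 0 < j → (j - 1) / 2 = par → ni ≤ l'.getD j 0 := by
        intro j hjl hj hjc
        rw [hlen'] at hjl
        by_cases hjpos : j = pos
        · rw [hjpos, hgdp]; omega
        · rw [hgd j hjpos]
          have h2 : l.getD ((j - 1) / 2) 0 ≤ l.getD j 0 :=
            hh.1 j hj hjl hjpos (by omega)
          rw [hjc] at h2
          omega
      obtain ⟨hA, hB⟩ := ih par hparlt l' (by omega) hh' hch'
      refine ⟨hA, hB.trans ?_⟩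
      exact ((holeMove l pos par hpos hparlen (by omega)).cons ni)
    · next hge =>
      -- stop: place ni at pos
      refine ⟨?_, set_perm l pos ni hpos⟩
      intro j hj hjl
      rw [List.length_set] at hjl
      by_cases hjpos : j = pos
      · rw [hjpos, getD_set_ne l pos ((pos - 1) / 2) ni (by omega),
            getD_set_self l pos ni hpos]
        rw [hpar] at hge
        omega
      · by_cases hpj : (j - 1) / 2 = pos
        · rw [hpj, getD_set_self l pos ni hpos,
              getD_set_ne l pos j ni (fun h => hjpos h.symm)]
          exact hch j hjl hj hpj
        · rw [getD_set_ne l pos _ ni (fun h => hpj h.symm),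
              getD_set_ne l pos j ni (fun h => hjpos h.symm)]
          exact hh.1 j hj hjl hjpos hpj

theorem suLoop_spec (l : List Int) (pos : Nat) (ni : Int)
    (hpos : pos < l.length) (hh : HeapHole l pos) :
    IsHeap (suLoop l 0 pos ni) ∧ (suLoop l 0 pos ni).Perm (ni :: l.eraseIdx pos) := by
  induction hn : l.length - pos using Nat.strong_induction_on generalizing l pos with
  | _ n ih =>
  rw [suLoop]
  split
  · next hch =>
    -- descend: move the smaller child up, hole moves to childSel l pos
    set c := childSel l pos with hcdef
    have hcor : c = 2 * pos + 1 ∨ c = 2 * pos + 2 := by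
      rw [hcdef, childSel]; split
      · right; rfl
      · left; rfl
    have hclen : c < l.length := by
      rw [hcdef, childSel]; split
      · next hr => exact hr.1
      · exact hch
    have hcpos : pos < c := by omega
    have hcp : (c - 1) / 2 = pos := by omega
    have hcmin : ∀ d, d < l.length → 0 < d → (d - 1) / 2 = pos →
        l.getD c 0 ≤ l.getD d 0 := by
      intro d hdl hd0 hdp
      have hd : d = 2 * pos + 1 ∨ d = 2 * pos + 2 := by omega
      rw [hcdef, childSel]
      split
      · next hr =>
        rcases hd with rfl | rfl
        · omega
        · exact le_refl _
      · next hr =>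
        rcases hd with rfl | rfl
        · exact le_refl _
        · rw [Classical.not_and_iff_not_or_not, not_not] at hr
          rcases hr with h1 | h2
          · omega
          · omega
    set l' := l.set pos (l.getD c 0) with hl'
    have hlen' : l'.length = l.length := by simp [hl']
    have hgd : ∀ k, k ≠ pos → l'.getD k 0 = l.getD k 0 :=
      fun k hk => getD_set_ne l pos k _ (fun h => hk h.symm)
    have hgdp : l'.getD pos 0 = l.getD c 0 := getD_set_self l pos _ hpos
    have hh' : HeapHole l' c := by
      constructor
      · intro j hj hjl hjc hparc
        rw [hlen'] at hjl
        by_cases hjpos : j = pos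
        · have h0p : 0 < pos := hjpos ▸ hj
          have hne : (pos - 1) / 2 ≠ pos := by omega
          rw [hjpos, hgd _ hne, hgdp]
          exact hh.2 c hclen hcp h0p
        · rw [hgd j hjpos]
          by_cases hpj : (j - 1) / 2 = pos
          · rw [hpj, hgdp]
            exact hcmin j hjl hj hpj
          · rw [hgd _ hpj]
            exact hh.1 j hj hjl hjpos hpj
      · intro j hjl hjc h0c
        rw [hlen'] at hjl
        rw [hcp, hgdp]
        have hjpos : j ≠ pos := by omega
        rw [hgd j hjpos]
        have h2 : l.getD ((j - 1) / 2) 0 ≤ l.getD j 0 :=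
          hh.1 j (by omega) hjl hjpos (by omega)
        rw [hjc] at h2
        exact h2
    obtain ⟨hA, hB⟩ := ih (l.length - c) (by omega) l' c (by omega) hh' (by omega)
    refine ⟨hA, hB.trans ?_⟩
    exact (holeMove l pos c hpos hclen (by omega)).cons ni
  · next hch =>
    -- leaf reached: place newitem and bubble it up with _siftdown
    have h1 : pos < (l.set pos ni).length := by simpa using hpos
    have h2 : HeapHole (l.set pos ni) pos := heapHole_set_hole l pos ni hh
    have h3 : ∀ j, j < (l.set pos ni).length → 0 < j → (j - 1) / 2 = pos →
        ni ≤ (l.set pos ni).getD j 0 := by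
      intro j hjl _ hjp
      rw [List.length_set] at hjl
      omega
    obtain ⟨hA, hB⟩ := sdLoop_spec pos (l.set pos ni) ni h1 h2 h3
    rw [eraseIdx_set_same] at hB
    exact ⟨hA, hB⟩

theorem heap_min (l : List Int) (hh : IsHeap l) :
    ∀ i, i < l.length → l.getD 0 0 ≤ l.getD i 0 := by
  intro i
  induction i using Nat.strong_induction_on with
  | _ i ih =>
    intro hi
    rcases Nat.eq_zero_or_pos i with h0 | h0
    · subst h0; exact le_refl _
    · exact le_trans (ih ((i - 1) / 2) (by omega) (by omega)) (hh i h0 hi)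

theorem heap_min_mem (l : List Int) (hh : IsHeap l) (x : Int) (hx : x ∈ l) :
    l.getD 0 0 ≤ x := by
  obtain ⟨i, hi, rfl⟩ := List.getElem_of_mem hx
  rw [← List.getD_eq_getElem l 0 hi]
  exact heap_min l hh i hi

theorem eraseIdx_append_len (l : List Int) (x : Int) :
    (l ++ [x]).eraseIdx l.length = l := by
  induction l with
  | nil => rfl
  | cons a t ih => simpa using ih

theorem heappop_spec (l : List Int) (hh : IsHeap l) (hne : 0 < l.length) :
    (heappop l).1 = l.getD 0 0 ∧ IsHeap (heappop l).2 ∧ (heappop l).2.Perm l.tail := by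
  match l with
  | [] => simp at hne
  | x :: t =>
  rcases List.eq_nil_or_concat t with rfl | ⟨ys, y, rfl⟩
  · refine ⟨rfl, ?_, List.Perm.refl _⟩
    intro j _ hjl
    simp [heappop] at hjl
  · simp only [List.concat_eq_append] at hh ⊢
    have hform : x :: (ys ++ [y]) = (x :: ys) ++ [y] := by simp
    have hdrop : (x :: (ys ++ [y])).dropLast = x :: ys := by
      rw [hform, List.dropLast_concat]
    have hlast : (x :: (ys ++ [y])).getLastD 0 = y := by
      rw [hform, List.getLastD_concat]
    rw [heappop, hdrop, hlast]
    simp only [List.isEmpty_cons, if_neg (by simp : ¬ (false = true))]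
    set m := (x :: ys).set 0 y with hm
    have hmval : m = y :: ys := by rw [hm]; rfl
    have hmlen : m.length = ys.length + 1 := by rw [hmval]; simp
    have hsame : ∀ k, 0 < k → k < ys.length + 1 →
        m.getD k 0 = (x :: (ys ++ [y])).getD k 0 := by
      intro k hk hkl
      obtain ⟨k', rfl⟩ : ∃ k', k = k' + 1 := ⟨k - 1, by omega⟩
      rw [hmval, List.getD_cons_succ, List.getD_cons_succ,
          List.getD_append ys [y] 0 k' (by omega)]
    have hhole : HeapHole m 0 := by
      constructor
      · intro j hj hjl hj0 hpar0
        rw [hmlen] at hjl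
        rw [hsame j hj hjl, hsame ((j - 1) / 2) (by omega) (by omega)]
        exact hh j hj (by simp; omega)
      · intro j _ _ h0
        omega
    have hpos0 : (0 : Nat) < m.length := by omega
    obtain ⟨hA, hB⟩ := suLoop_spec m 0 (m.getD 0 0) hpos0 hhole
    rw [siftup]
    refine ⟨rfl, hA, hB.trans ?_⟩
    have : m.getD 0 0 = y := by rw [hmval]; rfl
    rw [this, hmval]
    simp only [List.eraseIdx_cons_zero, List.tail_cons]
    exact (List.perm_append_singleton y ys).symm

theorem heappush_spec (l : List Int) (x : Int) (hh : IsHeap l) :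
    IsHeap (heappush l x) ∧ (heappush l x).Perm (x :: l) := by
  rw [heappush]
  have hlen : (l ++ [x]).length = l.length + 1 := by simp
  have hpos : l.length < (l ++ [x]).length := by omega
  have hhole : HeapHole (l ++ [x]) l.length := by
    constructor
    · intro j hj hjl hjp hparp
      rw [hlen] at hjl
      have hjlt : j < l.length := by omega
      rw [List.getD_append l [x] 0 j hjlt,
          List.getD_append l [x] 0 ((j - 1) / 2) (by omega)]
      exact hh j hj hjlt
    · intro j hjl hjp h0
      rw [hlen] at hjl
      omega
  have hch : ∀ j, j < (l ++ [x]).length → 0 < j → (j - 1) / 2 = l.length →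
      x ≤ (l ++ [x]).getD j 0 := by
    intro j hjl hj hjp
    rw [hlen] at hjl
    omega
  obtain ⟨hA, hB⟩ := sdLoop_spec l.length (l ++ [x]) x hpos hhole hch
  refine ⟨hA, hB.trans ?_⟩
  rw [eraseIdx_append_len]

-- ---- heapify is the identity on a strictly increasing list ----
def SortedFrom (l : List Int) (pos : Nat) : Prop :=
  ∀ i j, pos ≤ i → i < j → j < l.length → l.getD i 0 < l.getD j 0

theorem sdLoop_set_self (l : List Int) (sp pos : Nat) (x ni : Int) :
    sdLoop (l.set pos x) sp pos ni = sdLoop l sp pos ni := by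
  conv_lhs => rw [sdLoop]
  conv_rhs => rw [sdLoop]
  by_cases h : sp < pos
  · simp only [dif_pos h]
    have hne : pos ≠ (pos - 1) / 2 := by omega
    rw [getD_set_ne l pos ((pos - 1) / 2) x hne]
    split <;> rw [List.set_set]
  · simp only [dif_neg h, List.set_set]

theorem suLoop_sorted (l : List Int) (sp pos : Nat) (ni : Int)
    (hs : SortedFrom l pos) (hni : ni ≤ l.getD pos 0) (hpos : pos < l.length)
    (hsp : sp ≤ pos) :
    suLoop l sp pos ni = sdLoop l sp pos ni := by
  induction hn : l.length - pos using Nat.strong_induction_on generalizing l pos with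
  | _ n ih =>
  rw [suLoop]
  split
  · next hch =>
    -- on a strictly increasing suffix the left child is always the smaller one
    have hc : childSel l pos = 2 * pos + 1 := by
      rw [childSel]
      split
      · next hr =>
        exact absurd (hs (2 * pos + 1) (2 * pos + 2) (by omega) (by omega) hr.1) hr.2
      · rfl
    rw [hc]
    have hlc : l.getD pos 0 < l.getD (2 * pos + 1) 0 :=
      hs pos (2 * pos + 1) (le_refl _) (by omega) hch
    set l' := l.set pos (l.getD (2 * pos + 1) 0) with hl'
    have hlen' : l'.length = l.length := by simp [hl']
    have hs' : SortedFrom l' (2 * pos + 1) := by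
      intro i j hi hij hjl
      rw [hlen'] at hjl
      rw [getD_set_ne l pos i _ (by omega), getD_set_ne l pos j _ (by omega)]
      exact hs i j (by omega) hij hjl
    have hni' : ni ≤ l'.getD (2 * pos + 1) 0 := by
      rw [getD_set_ne l pos _ _ (by omega)]
      omega
    rw [ih (l.length - (2 * pos + 1)) (by omega) l' (2 * pos + 1) hs' hni'
        (by omega) (by omega) (by omega)]
    conv_lhs => rw [sdLoop]
    rw [dif_pos (by omega : sp < 2 * pos + 1),
        show (2 * pos + 1 - 1) / 2 = pos from by omega,
        getD_set_self l pos _ hpos,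
        if_pos (by omega : ni < l.getD (2 * pos + 1) 0)]
    have hself : l'.set (2 * pos + 1) (l'.getD pos 0) = l' := by
      rw [getD_set_self l pos _ hpos,
          show l.getD (2 * pos + 1) 0 = l'.getD (2 * pos + 1) 0 from
            (getD_set_ne l pos _ _ (by omega)).symm]
      exact set_getD_self l' (2 * pos + 1) (by omega)
    rw [getD_set_self l pos _ hpos] at hself
    rw [hself, hl', sdLoop_set_self]
  · exact sdLoop_set_self l sp pos ni ni

theorem siftup_id (l : List Int) (pos : Nat)
    (hs : SortedFrom l 0) (hpos : pos < l.length) : siftup l pos = l := by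
  have hs' : SortedFrom l pos := fun i j h1 h2 h3 => hs i j (by omega) h2 h3
  rw [siftup, suLoop_sorted l pos pos _ hs' (le_refl _) hpos (le_refl _),
      sdLoop, dif_neg (lt_irrefl pos), set_getD_self l pos hpos]

theorem heapify_id (l : List Int) (hs : SortedFrom l 0) : pyHeapify l = l := by
  rw [pyHeapify]
  have : ∀ idxs : List Nat, (∀ i ∈ idxs, i < l.length) →
      idxs.foldl (fun h i => siftup h i) l = l := by
    intro idxs
    induction idxs with
    | nil => intro _; rfl
    | cons a t ih =>
      intro hmem
      simp only [List.foldl_cons, siftup_id l a hs (hmem a (by simp))]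
      exact ih (fun i hi => hmem i (by simp [hi]))
  apply this
  intro i hi
  simp only [List.mem_reverse, List.mem_range] at hi
  omega

theorem isHeap_of_sortedFrom (l : List Int) (hs : SortedFrom l 0) : IsHeap l := by
  intro j hj hjl
  exact le_of_lt (hs ((j - 1) / 2) j (by omega) (by omega) hjl)

-- ---- the abstract greedy on a sorted list ----
def insortD (x : Int) : List Int → List Int
  | [] => [x]
  | y :: t => if x ≤ y then x :: y :: t else y :: insortD x t

theorem insortD_length (x : Int) (l : List Int) : (insortD x l).length = l.length + 1 := by
  induction l with
  | nil => rfl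
  | cons y t ih => rw [insortD]; split <;> simp [ih]

def cost : List Int → Int
  | [] => 0
  | [_] => 0
  | a :: b :: t => (a + b) + cost (insortD (a + b) t)
termination_by l => l.length
decreasing_by simp [insortD_length]

theorem insortD_perm (x : Int) (l : List Int) : (insortD x l).Perm (x :: l) := by
  induction l with
  | nil => rfl
  | cons y t ih =>
    rw [insortD]
    split
    · exact List.Perm.refl _
    · exact (ih.cons y).trans (List.Perm.swap x y t)

theorem insortD_pairwise (x : Int) (l : List Int) (hl : l.Pairwise (· ≤ ·)) :
    (insortD x l).Pairwise (· ≤ ·) := by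
  induction l with
  | nil => simp [insortD]
  | cons y t ih =>
    rw [insortD]
    rcases List.pairwise_cons.mp hl with ⟨hy, ht⟩
    split
    · next h =>
      refine List.pairwise_cons.mpr ⟨?_, hl⟩
      intro z hz
      rcases List.mem_cons.mp hz with rfl | hz'
      · exact h
      · exact le_trans h (hy _ hz')
    · next h =>
      refine List.pairwise_cons.mpr ⟨?_, ih ht⟩
      intro z hz
      rcases List.mem_cons.mp ((insortD_perm x t).mem_iff.mp hz) with rfl | hz'
      · omega
      · exact hy _ hz'

theorem cost_nil : cost [] = 0 := by rw [cost]
theorem cost_single (a : Int) : cost [a] = 0 := by rw [cost]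
theorem cost_cons (a b : Int) (t : List Int) :
    cost (a :: b :: t) = (a + b) + cost (insortD (a + b) t) := by
  rw [cost]

-- head of a sorted permutation is the minimum
theorem sorted_head_eq (h : List Int) (a : Int) (t : List Int)
    (hperm : h.Perm (a :: t)) (hmin : ∀ x ∈ h, h.getD 0 0 ≤ x)
    (hsort : (a :: t).Pairwise (· ≤ ·)) (hne : 0 < h.length) :
    h.getD 0 0 = a := by
  have hmem0 : h.getD 0 0 ∈ h := by
    rw [List.getD_eq_getElem h 0 hne]; exact List.getElem_mem hne
  have h1 : a ≤ h.getD 0 0 := by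
    rcases List.mem_cons.mp (hperm.mem_iff.mp hmem0) with heq | hmem
    · omega
    · exact List.rel_of_pairwise_cons hsort hmem
  have h2 : h.getD 0 0 ≤ a := hmin a (hperm.mem_iff.mpr (by simp))
  omega

-- ---- loop A computes cost of any sorted permutation ----
theorem loopA_spec (f : Nat) (h l : List Int) (res : Int)
    (hh : IsHeap h) (hl : l.Pairwise (· ≤ ·)) (hperm : h.Perm l)
    (hf : h.length ≤ f) : loopA f h res = res + cost l := by
  induction f generalizing h l res with
  | zero =>
    have : l.length = 0 := hperm.length_eq ▸ (by omega)
    rw [List.length_eq_zero_iff] at this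
    subst this
    rw [loopA, cost_nil]
    omega
  | succ f ihf =>
    rw [loopA]
    split
    · next hlen =>
      have hllen : l.length = h.length := hperm.length_eq.symm
      match l, hllen, hl, hperm with
      | [], hllen, _, _ => simp at hllen; omega
      | [x], hllen, _, _ => simp at hllen; omega
      | a :: b :: t, hllen, hl, hperm =>
      match h, hh, hperm, hf, hlen with
      | hd :: tl, hh, hperm, hf, hlen =>
      simp only []
      obtain ⟨hp1, hp2, hp3⟩ := heappop_spec (hd :: tl) hh (by simp)
      have hmin : ∀ x ∈ hd :: tl, (hd :: tl).getD 0 0 ≤ x := heap_min_mem _ hh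
      have ha : (hd :: tl).getD 0 0 = a := sorted_head_eq _ a (b :: t) hperm hmin hl (by simp)
      rw [hp1, ha]
      have htl : tl.Perm (b :: t) := by
        have : hd :: tl = a :: tl := by
          have := ha; simpa [List.getD] using this
        rw [this] at hperm
        exact hperm.cons_inv
      have hpop1 : (heappop (hd :: tl)).2.Perm (b :: t) := by
        simpa using hp3.trans htl
      obtain ⟨hq1, hq2', hq3⟩ := heappop_spec (heappop (hd :: tl)).2 hp2
        (by rw [hpop1.length_eq]; simp)
      have hbl : (b :: t).Pairwise (· ≤ ·) := hl.of_cons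
      have hb : (heappop (hd :: tl)).2.getD 0 0 = b :=
        sorted_head_eq _ b t hpop1 (heap_min_mem _ hp2) hbl (by rw [hpop1.length_eq]; simp)
      rw [hq1, hb]
      -- second pop leaves a permutation of t
      have hpop2 : (heappop (heappop (hd :: tl)).2).2.Perm t := by
        match hm : (heappop (hd :: tl)).2, hpop1, hq3, hb with
        | c :: ct, hpop1, hq3, hb =>
          have : c :: ct = b :: ct := by simpa [List.getD] using hb
          rw [this] at hpop1
          exact hq3.trans (List.tail_cons ▸ hpop1.cons_inv)
        | [], hpop1, _, _ => exact absurd hpop1.length_eq (by simp)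
      obtain ⟨hr1, hr2⟩ := heappush_spec _ (a + b) hq2'
      have hpushperm : (heappush (heappop (heappop (hd :: tl)).2).2 (a + b)).Perm
          (insortD (a + b) t) :=
        (hr2.trans (hpop2.cons _)).trans (insortD_perm (a + b) t).symm
      rw [ihf _ _ _ hr1 (insortD_pairwise _ _ (hbl.of_cons)) hpushperm
          (by have h2 : tl.length + 1 = t.length + 2 := by simpa using hperm.length_eq
              have h3 : tl.length + 1 ≤ f + 1 := by simpa using hf
              rw [hpushperm.length_eq, insortD_length]
              omega)]
      rw [cost_cons]
      ring
    · next hlen =>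
      have : l.length ≤ 1 := hperm.length_eq ▸ (by omega)
      match l, this with
      | [], _ => rw [cost_nil]; omega
      | [x], _ => rw [cost_single]; omega

-- ---- one takeMin step pops the global minimum of the two queues ----
theorem takeMin_spec (primes sums : List Int) (i j : Nat) (a : Int) (rest : List Int)
    (hp : (primes.drop i).Pairwise (· ≤ ·)) (hs : (sums.drop j).Pairwise (· ≤ ·))
    (hi : i ≤ primes.length) (hj : j ≤ sums.length)
    (hperm : (primes.drop i ++ sums.drop j).Perm (a :: rest))
    (hsort : (a :: rest).Pairwise (· ≤ ·)) :
    (takeMin primes sums i j).1 = a ∧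
    (primes.drop (takeMin primes sums i j).2.1).Pairwise (· ≤ ·) ∧
    (sums.drop (takeMin primes sums i j).2.2).Pairwise (· ≤ ·) ∧
    (∀ z ∈ sums.drop (takeMin primes sums i j).2.2, z ∈ sums.drop j) ∧
    (primes.drop (takeMin primes sums i j).2.1 ++
      sums.drop (takeMin primes sums i j).2.2).Perm rest ∧
    (takeMin primes sums i j).2.1 ≤ primes.length ∧
    (takeMin primes sums i j).2.2 ≤ sums.length ∧
    j ≤ (takeMin primes sums i j).2.2 := by
  have hmemle : ∀ x ∈ a :: rest, a ≤ x := by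
    intro x hx
    rcases List.mem_cons.mp hx with rfl | hx'
    · exact le_refl _
    · exact List.rel_of_pairwise_cons hsort hx'
  rw [takeMin]
  split
  · next hcond =>
    -- take from primes
    have hilt : i < primes.length := by
      rcases hcond with hje | hcond
      · -- sums side empty, but the union is nonempty
        by_contra hge
        have h1 : primes.drop i = [] := List.drop_eq_nil_of_le (by omega)
        have h2 : sums.drop j = [] := List.drop_eq_nil_of_le (by omega)
        have := hperm.length_eq
        rw [h1, h2] at this
        simp at this
      · exact hcond.1
    have hdropp : primes.drop i = primes[i] :: primes.drop (i + 1) :=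
      List.drop_eq_getElem_cons hilt
    have hgdi : primes.getD i 0 = primes[i] := List.getD_eq_getElem primes 0 hilt
    have hvala : primes.getD i 0 = a := by
      have hmem : primes.getD i 0 ∈ a :: rest := by
        refine hperm.mem_iff.mp ?_
        rw [hgdi]
        exact List.mem_append_left _ (by rw [hdropp]; exact List.mem_cons_self ..)
      have hle1 : a ≤ primes.getD i 0 := hmemle _ hmem
      have hle2 : primes.getD i 0 ≤ a := by
        have hamem : a ∈ primes.drop i ++ sums.drop j := hperm.mem_iff.mpr (by simp)
        rcases List.mem_append.mp hamem with hma | hma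
        · rw [hdropp] at hma
          rw [hgdi]
          rcases List.mem_cons.mp hma with heq | hma'
          · omega
          · exact List.rel_of_pairwise_cons (hdropp ▸ hp) hma'
        · rcases hcond with hje | hcond
          · rw [hje] at hma
            simp at hma
          · have hjlt : j < sums.length := by
              by_contra hge
              rw [List.drop_eq_nil_of_le (by omega)] at hma
              simp at hma
            have hdrops : sums.drop j = sums[j] :: sums.drop (j + 1) :=
              List.drop_eq_getElem_cons hjlt
            have hgdj : sums.getD j 0 = sums[j] := List.getD_eq_getElem sums 0 hjlt
            have hja : sums.getD j 0 ≤ a := by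
              rw [hdrops] at hma
              rcases List.mem_cons.mp hma with heq | hma'
              · omega
              · have := List.rel_of_pairwise_cons (hdrops ▸ hs) hma'
                omega
            exact le_trans hcond.2 hja
      omega
    dsimp only
    refine ⟨hvala, ?_, hs, fun z hz => hz, ?_, by omega, hj, le_refl _⟩
    · have : primes.drop (i + 1) = (primes.drop i).drop 1 := by
        rw [List.drop_drop]
      rw [this]
      exact hp.sublist (List.drop_sublist _ _)
    · have heqa : primes[i] = a := by omega
      have hsplit : primes.drop i ++ sums.drop j
          = a :: (primes.drop (i + 1) ++ sums.drop j) := by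
        rw [hdropp, heqa]
        rfl
      rw [hsplit] at hperm
      exact hperm.cons_inv
  · next hcond =>
    -- take from sums
    rw [not_or, not_and_or, not_lt, not_le] at hcond
    obtain ⟨hjne, hcond2⟩ := hcond
    have hjlt : j < sums.length := by omega
    have hdrops : sums.drop j = sums[j] :: sums.drop (j + 1) :=
      List.drop_eq_getElem_cons hjlt
    have hgdj : sums.getD j 0 = sums[j] := List.getD_eq_getElem sums 0 hjlt
    have hvala : sums.getD j 0 = a := by
      have hmem : sums.getD j 0 ∈ a :: rest := by
        refine hperm.mem_iff.mp ?_
        rw [hgdj]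
        exact List.mem_append_right _ (by rw [hdrops]; exact List.mem_cons_self ..)
      have hle1 : a ≤ sums.getD j 0 := hmemle _ hmem
      have hle2 : sums.getD j 0 ≤ a := by
        have hamem : a ∈ primes.drop i ++ sums.drop j := hperm.mem_iff.mpr (by simp)
        rcases List.mem_append.mp hamem with hma | hma
        · have hilt : i < primes.length := by
            by_contra hge
            rw [List.drop_eq_nil_of_le (by omega)] at hma
            simp at hma
          have hdropp : primes.drop i = primes[i] :: primes.drop (i + 1) :=
            List.drop_eq_getElem_cons hilt
          have hgdi : primes.getD i 0 = primes[i] := List.getD_eq_getElem primes 0 hilt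
          have hlt : sums.getD j 0 < primes.getD i 0 := by
            rcases hcond2 with h | h
            · omega
            · exact h
          have hia : primes.getD i 0 ≤ a := by
            rw [hdropp] at hma
            rw [hgdi]
            rcases List.mem_cons.mp hma with heq | hma'
            · omega
            · exact List.rel_of_pairwise_cons (hdropp ▸ hp) hma'
          omega
        · rw [hdrops] at hma
          rw [hgdj]
          rcases List.mem_cons.mp hma with heq | hma'
          · omega
          · exact List.rel_of_pairwise_cons (hdrops ▸ hs) hma'
      omega
    dsimp only
    refine ⟨hvala, hp, ?_, ?_, ?_, hi, by omega, by omega⟩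
    · have : sums.drop (j + 1) = (sums.drop j).drop 1 := by rw [List.drop_drop]
      rw [this]
      exact hs.sublist (List.drop_sublist _ _)
    · intro z hz
      have : sums.drop (j + 1) = (sums.drop j).drop 1 := by rw [List.drop_drop]
      rw [this] at hz
      exact (List.drop_sublist _ _).mem hz
    · have : primes.drop i ++ sums.drop j = primes.drop i ++ sums[j] :: sums.drop (j + 1) := by
        rw [hdrops]
      rw [this] at hperm
      have hmid := (List.perm_middle (a := sums[j])
        (l₁ := primes.drop i) (l₂ := sums.drop (j + 1)))
      have : (sums[j] :: (primes.drop i ++ sums.drop (j + 1))).Perm (a :: rest) :=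
        hmid.symm.trans hperm
      rw [← hgdj, hvala] at this
      exact this.cons_inv

-- ---- loop B computes cost of any sorted permutation ----
theorem loopB_spec (f : Nat) (primes sums : List Int) (i j : Nat) (res : Int)
    (l : List Int)
    (hp : (primes.drop i).Pairwise (· ≤ ·)) (hs : (sums.drop j).Pairwise (· ≤ ·))
    (hi : i ≤ primes.length) (hj : j ≤ sums.length)
    (hperm : l.Perm (primes.drop i ++ sums.drop j)) (hl : l.Pairwise (· ≤ ·))
    (hq2 : ∀ z ∈ sums.drop j, ∀ x ∈ l, z ≤ 2 * x) (hpos : ∀ x ∈ l, 1 ≤ x)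
    (hf : l.length ≤ f) : loopB f primes sums i j res = res + cost l := by
  induction f generalizing sums i j res l with
  | zero =>
    have : l.length = 0 := by omega
    rw [List.length_eq_zero_iff] at this
    subst this
    rw [loopB, cost_nil]
    omega
  | succ f ihf =>
    have hlen : (primes.drop i ++ sums.drop j).length = l.length := hperm.symm.length_eq
    simp only [List.length_append, List.length_drop] at hlen
    rw [loopB]
    split
    · next hguard =>
      have hll : 1 < l.length := by omega
      match l, hll, hperm, hl, hq2, hpos, hf with
      | [], hll, _, _, _, _, _ => simp at hll
      | [x], hll, _, _, _, _, _ => simp at hll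
      | a :: b :: t, hll, hperm, hl, hq2, hpos, hf =>
      simp only []
      obtain ⟨hv1, hp1, hs1, hsub1, hperm1, hi1, hj1, hjle1⟩ :=
        takeMin_spec primes sums i j a (b :: t) hp hs hi hj hperm.symm hl
      obtain ⟨hv2, hp2, hs2, hsub2, hperm2, hi2, hj2, hjle2⟩ :=
        takeMin_spec primes sums _ _ b t hp1 hs1 hi1 hj1 hperm1 hl.of_cons
      rw [hv1, hv2]
      set i2 := (takeMin primes sums (takeMin primes sums i j).2.1
        (takeMin primes sums i j).2.2).2.1 with hi2def
      set j2 := (takeMin primes sums (takeMin primes sums i j).2.1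
        (takeMin primes sums i j).2.2).2.2 with hj2def
      have hab : a ≤ b := List.rel_of_pairwise_cons hl (by simp)
      have ha1 : 1 ≤ a := hpos a (by simp)
      have hb1 : 1 ≤ b := hpos b (by simp)
      have hdropapp : (sums ++ [a + b]).drop j2 = sums.drop j2 ++ [a + b] :=
        List.drop_append_of_le_length hj2
      have hzj : ∀ z ∈ sums.drop j2, z ∈ sums.drop j :=
        fun z hz => hsub1 z (hsub2 z hz)
      have hzle : ∀ z ∈ sums.drop j2, z ≤ a + b := by
        intro z hz
        have := hq2 z (hzj z hz) a (by simp)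
        omega
      have hs' : ((sums ++ [a + b]).drop j2).Pairwise (· ≤ ·) := by
        rw [hdropapp]
        rw [List.pairwise_append]
        exact ⟨hs2, by simp, by simpa using hzle⟩
      have hperm' : (insortD (a + b) t).Perm
          (primes.drop i2 ++ (sums ++ [a + b]).drop j2) := by
        rw [hdropapp, ← List.append_assoc]
        exact ((insortD_perm _ _).trans (List.perm_append_singleton _ _).symm).trans
          (hperm2.symm.append_right _)
      have htpos : ∀ x ∈ insortD (a + b) t, 1 ≤ x := by
        intro x hx
        rcases List.mem_cons.mp ((insortD_perm _ _).mem_iff.mp hx) with rfl | hx'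
        · omega
        · exact hpos x (by simp [hx'])
      have hbt : ∀ x ∈ t, b ≤ x := fun x hx => List.rel_of_pairwise_cons hl.of_cons hx
      have hq2' : ∀ z ∈ (sums ++ [a + b]).drop j2, ∀ x ∈ insortD (a + b) t,
          z ≤ 2 * x := by
        intro z hz x hx
        rw [hdropapp, List.mem_append] at hz
        rcases List.mem_cons.mp ((insortD_perm _ _).mem_iff.mp hx) with rfl | hx'
        · rcases hz with hz | hz
          · have := hq2 z (hzj z hz) a (by simp)
            omega
          · simp at hz
            omega
        · have hbx : b ≤ x := hbt x hx'
          rcases hz with hz | hz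
          · exact hq2 z (hzj z hz) x (by simp [hx'])
          · simp at hz
            omega
      rw [ihf (sums ++ [a + b]) i2 j2 (res + (a + b)) (insortD (a + b) t)
          hp2 hs' hi2 (by simp; omega) hperm'
          (insortD_pairwise _ _ (hl.of_cons.of_cons)) hq2' htpos
          (by rw [insortD_length]
              have := hperm.length_eq
              simp at this
              omega)]
      rw [cost_cons]
      ring
    · next hguard =>
      have hle1 : l.length ≤ 1 := by omega
      match l, hle1 with
      | [], _ => rw [cost_nil]; omega
      | [x], _ => rw [cost_single]; omega
      | x :: y :: t, h2 => simp at h2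

-- ---- the sieve output is strictly increasing with entries ≥ 2 ----
theorem sieve_inv (N : Int) (xs : List Int) (st : List Int × List Int)
    (hxs2 : ∀ y ∈ xs, 2 ≤ y) (hxs : xs.Pairwise (· < ·))
    (h1 : st.1.Pairwise (· < ·)) (h2 : ∀ x ∈ st.1, 2 ≤ x)
    (h3 : ∀ x ∈ st.1, ∀ y ∈ xs, x < y) :
    (xs.foldl (sieveStep N) st).1.Pairwise (· < ·) ∧
      ∀ x ∈ (xs.foldl (sieveStep N) st).1, 2 ≤ x := by
  induction xs generalizing st with
  | nil => exact ⟨h1, h2⟩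
  | cons i rest ih =>
    have hfst : (sieveStep N st i).1
        = if st.2.getD i.toNat 0 = 0 then st.1 ++ [i] else st.1 := rfl
    rw [List.foldl_cons]
    refine ih (sieveStep N st i) (fun y hy => hxs2 y (by simp [hy])) hxs.of_cons
      ?_ ?_ ?_
    · rw [hfst]
      split
      · refine List.pairwise_append.mpr ⟨h1, by simp, ?_⟩
        intro x hx y hy
        simp only [List.mem_singleton] at hy
        rw [hy]
        exact h3 x hx i (by simp)
      · exact h1
    · rw [hfst]
      intro x hx
      split at hx
      · rcases List.mem_append.mp hx with hx' | hx'
        · exact h2 x hx'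
        · simp only [List.mem_singleton] at hx'
          rw [hx']
          exact hxs2 i (by simp)
      · exact h2 x hx
    · rw [hfst]
      intro x hx y hy
      split at hx
      · rcases List.mem_append.mp hx with hx' | hx'
        · exact h3 x hx' y (by simp [hy])
        · simp only [List.mem_singleton] at hx'
          rw [hx']
          exact List.rel_of_pairwise_cons hxs hy
      · exact h3 x hx y (by simp [hy])

theorem batchSieve_inv (N : Int) :
    (batchSieve N).Pairwise (· < ·) ∧ ∀ x ∈ batchSieve N, 2 ≤ x := by
  rw [batchSieve]
  exact sieve_inv N (PySem.List.pyRange 2 (N + 1) 1)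
    ([], List.replicate (N + 1).toNat 0)
    (fun y hy => ((PySem.List.mem_pyRange_one).mp hy).1)
    (PySem.List.pairwise_lt_pyRange_one _ _)
    (by simp) (by simp) (by simp)

-- ===== VERDICT (by name: the statement is the Claim_ definition above) =====
theorem solve_spec : Claim_equal_solve := by
  intro N _
  unfold Spec_solve solve solve_alt
  obtain ⟨hpair, h2⟩ := batchSieve_inv N
  set ps := batchSieve N with hps
  have hsf : SortedFrom ps 0 := by
    intro i j _ hij hjl
    rw [List.getD_eq_getElem ps 0 (by omega), List.getD_eq_getElem ps 0 hjl]
    exact List.pairwise_iff_getElem.mp hpair i j (by omega) hjl hij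
  have hle : ps.Pairwise (· ≤ ·) := hpair.imp le_of_lt
  rw [heapify_id ps hsf]
  rw [loopA_spec ps.length ps ps 0 (isHeap_of_sortedFrom ps hsf) hle (List.Perm.refl ps) (le_refl _)]
  rw [loopB_spec ps.length ps [] 0 0 0 ps (by simpa using hle) (by simp)
      (by omega) (by simp) (by simp) hle (by simp) (fun x hx => by have := h2 x hx; omega)
      (le_refl _)]
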